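-- pv_equiv track=rewrite | github.com/Vinesh-R/Wall_Is_Your | fichier.py | niveau_coherent
-- ===== SOURCE A (Python) =====
-- def niveau_coherent(aventurier_nv, dragons_nv):
--
--     dragons_nv.sort()
--     for nv in dragons_nv:
--         if nv <= aventurier_nv:
--             aventurier_nv += 1
--         else:
--             return False
--
--     return True
-- ===== SOURCE B (Python) =====
-- def niveau_coherent(aventurier_nv, dragons_nv):
--     # Sort-free counting criterion: dragon d can be defeated iff, by the time
--     # it is fought (in optimal weakest-first order), the level has risen by the
--     # number of strictly weaker dragons, i.e. count(e < d) >= d - aventurier_nv.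
--     # Note: A sorts dragons_nv in place; B does not mutate its argument.
--     return all(
--         sum(1 for e in dragons_nv if e < d) >= d - aventurier_nv
--         for d in dragons_nv
--     )
-- ===== Notes on version B (the rewrite author's own statement) =====
-- stated objective: alternative
-- what changed: Replaces sort-then-sweep with a sort-free counting criterion: every dragon d is defeatable iff at least d - aventurier_nv dragons are strictly weaker than d, checked by pairwise counting; B also does not mutate dragons_nv (A sorts it in place), equivalence is about the return value.
import Mathlib
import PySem

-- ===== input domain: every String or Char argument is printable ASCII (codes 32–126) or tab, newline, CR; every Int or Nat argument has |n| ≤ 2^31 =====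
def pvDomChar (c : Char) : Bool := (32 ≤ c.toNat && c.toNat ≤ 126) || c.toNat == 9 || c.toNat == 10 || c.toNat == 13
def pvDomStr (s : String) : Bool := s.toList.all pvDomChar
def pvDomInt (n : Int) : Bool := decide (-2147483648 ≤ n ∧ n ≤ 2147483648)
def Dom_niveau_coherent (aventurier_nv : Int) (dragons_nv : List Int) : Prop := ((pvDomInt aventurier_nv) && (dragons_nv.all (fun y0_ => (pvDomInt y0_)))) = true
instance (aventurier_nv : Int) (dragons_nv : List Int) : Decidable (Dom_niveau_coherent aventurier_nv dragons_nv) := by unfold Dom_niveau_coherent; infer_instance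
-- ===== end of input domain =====

-- B replaces A's sort-then-sweep with a sort-free pairwise-counting criterion (alternative);
-- A sorts dragons_nv in place while B does not mutate it: the equivalence proved is about the return value only.

-- ===== PORT A =====
-- A's loop over the sorted list with the mutating accumulator `aventurier_nv`.
def niveauLoopA (aventurier_nv : Int) : List Int → Bool
  | [] => true
  | nv :: rest => if nv ≤ aventurier_nv then niveauLoopA (aventurier_nv + 1) rest else false

def niveau_coherent (aventurier_nv : Int) (dragons_nv : List Int) : Bool :=
  niveauLoopA aventurier_nv (PySem.List.sorted dragons_nv id false)

-- ===== PORT B =====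
def niveau_coherent_alt (aventurier_nv : Int) (dragons_nv : List Int) : Bool :=
  dragons_nv.all (fun d =>
    decide ((↑(dragons_nv.countP (fun e => decide (e < d))) : Int) ≥ d - aventurier_nv))

-- ===== PRECONDITION & SPEC =====
def Spec_niveau_coherent (aventurier_nv : Int) (dragons_nv : List Int) (out : Bool) : Prop := out = niveau_coherent_alt aventurier_nv dragons_nv
instance (aventurier_nv : Int) (dragons_nv : List Int) (out : Bool) : Decidable (Spec_niveau_coherent aventurier_nv dragons_nv out) := by unfold Spec_niveau_coherent; infer_instance

-- ===== CLAIM (what is proved, stated in full; the proofs are below) =====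
def Claim_equal_niveau_coherent : Prop := ∀ (aventurier_nv : Int) (dragons_nv : List Int), Dom_niveau_coherent aventurier_nv dragons_nv → Spec_niveau_coherent aventurier_nv dragons_nv (niveau_coherent aventurier_nv dragons_nv)

-- ===== LEMMAS AND PROOFS =====

-- A's loop succeeds iff every position i of the (sorted) list satisfies l[i] ≤ a + i.
theorem niveauLoopA_iff (l : List Int) : ∀ (a : Int),
    niveauLoopA a l = true ↔ ∀ i (h : i < l.length), l[i] ≤ a + i := by
  induction l with
  | nil => intro a; simp [niveauLoopA]
  | cons nv rest ih =>
    intro a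
    simp only [niveauLoopA]
    by_cases h : nv ≤ a
    · simp only [if_pos h, ih (a + 1)]
      constructor
      · intro hr i hi
        cases i with
        | zero => simpa using h
        | succ j =>
          have h2 := hr j (by simpa using hi)
          rw [List.getElem_cons_succ]
          push_cast at h2 ⊢
          omega
      · intro hall j hj
        have h2 := hall (j + 1) (by simpa using hj)
        rw [List.getElem_cons_succ] at h2
        push_cast at h2 ⊢
        omega
    · simp only [if_neg h]
      constructor
      · intro hf; exact absurd hf (by simp)
      · intro hall
        have := hall 0 (by simp)
        simp at this; omega

-- In a ≤-sorted list, every element strictly below l[i] sits at a position < i.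
theorem countP_lt_le_idx (l : List Int) (hs : l.Pairwise (· ≤ ·)) (i : Nat) (hi : i < l.length)
    (v : Int) (hv : l[i] = v) :
    l.countP (fun e => decide (e < v)) ≤ i := by
  have hsplit : l = l.take i ++ l.drop i := (List.take_append_drop i l).symm
  have hdrop : (l.drop i).countP (fun e => decide (e < v)) = 0 := by
    rw [List.countP_eq_zero]
    intro x hx
    rw [List.mem_iff_getElem] at hx
    obtain ⟨k, hk, hxk⟩ := hx
    have hk' : i + k < l.length := by
      have := hk; rw [List.length_drop] at this; omega
    have hx' : x = l[i + k] := by rw [← hxk, List.getElem_drop]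
    have hle : l[i] ≤ l[i + k] := by
      rcases Nat.eq_or_lt_of_le (Nat.le_add_right i k) with he | hlt
      · simp [← he]
      · exact (List.pairwise_iff_getElem.mp hs) i (i + k) hi hk' hlt
    rw [hv] at hle
    simp [hx']; omega
  calc l.countP (fun e => decide (e < v))
      = (l.take i).countP (fun e => decide (e < v)) +
        (l.drop i).countP (fun e => decide (e < v)) := by
        conv_lhs => rw [hsplit]
        rw [List.countP_append]
    _ ≤ (l.take i).length + 0 := by rw [hdrop]; exact Nat.add_le_add (List.countP_le_length) le_rfl
    _ ≤ i := by rw [List.length_take]; omega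

-- In a ≤-sorted list, with c = #{e ∈ l | e < l[i]} we have l[c] = l[i].
theorem getElem_countP_lt (l : List Int) (hs : l.Pairwise (· ≤ ·)) (i : Nat) (hi : i < l.length)
    (v : Int) (hv : l[i] = v)
    (hc : l.countP (fun e => decide (e < v)) < l.length) :
    l[l.countP (fun e => decide (e < v))] = v := by
  set c := l.countP (fun e => decide (e < v)) with hcdef
  have hci : c ≤ i := countP_lt_le_idx l hs i hi v hv
  have hle : l[c] ≤ v := by
    rw [← hv]
    rcases Nat.eq_or_lt_of_le hci with he | hlt
    · simp [he]
    · exact (List.pairwise_iff_getElem.mp hs) c i hc hi hlt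
  rcases lt_or_eq_of_le hle with hlt | he
  · -- then the first c+1 positions are all < l[i], so the count is ≥ c+1: contradiction
    exfalso
    have : c + 1 ≤ (l.take (c + 1)).countP (fun e => decide (e < v)) := by
      have hall : ∀ x ∈ l.take (c + 1), decide (x < v) = true := by
        intro x hx
        rw [List.mem_iff_getElem] at hx
        obtain ⟨k, hk, hxk⟩ := hx
        have hk' : k < c + 1 := by
          have := hk; rw [List.length_take] at this; omega
        have hkl : k < l.length := by omega
        have hx' : x = l[k] := by rw [← hxk, List.getElem_take]
        have : l[k] ≤ l[c] := by
          rcases Nat.eq_or_lt_of_le (Nat.lt_succ_iff.mp hk') with he2 | hlt2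
          · simp [he2]
          · exact (List.pairwise_iff_getElem.mp hs) k c hkl hc hlt2
        simp [hx']; omega
      have := List.countP_eq_length.mpr hall
      rw [this, List.length_take]; omega
    have hmono : (l.take (c + 1)).countP (fun e => decide (e < v)) ≤ c := by
      calc (l.take (c + 1)).countP (fun e => decide (e < v))
          ≤ l.countP (fun e => decide (e < v)) := by
            conv_rhs => rw [← List.take_append_drop (c + 1) l]
            rw [List.countP_append]; omega
        _ = c := hcdef.symm
    omega
  · exact he

-- For a ≤-sorted list, the positional condition is the counting condition.
theorem pos_iff_count (l : List Int) (hs : l.Pairwise (· ≤ ·)) (a : Int) :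
    (∀ i (h : i < l.length), l[i] ≤ a + i) ↔
    (∀ d ∈ l, d - a ≤ (l.countP (fun e => decide (e < d)) : Int)) := by
  constructor
  · intro hpos d hd
    rw [List.mem_iff_getElem] at hd
    obtain ⟨i, hi, hdi⟩ := hd
    subst hdi
    set c := l.countP (fun e => decide (e < l[i])) with hcdef
    have hci : c ≤ i := countP_lt_le_idx l hs i hi l[i] rfl
    have hcl : c < l.length := by omega
    have hlc : l[c] = l[i] := getElem_countP_lt l hs i hi l[i] rfl hcl
    have := hpos c hcl
    rw [hlc] at this
    omega
  · intro hcnt i hi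
    have := hcnt l[i] (List.getElem_mem hi)
    have hci : l.countP (fun e => decide (e < l[i])) ≤ i := countP_lt_le_idx l hs i hi l[i] rfl
    omega

-- ===== VERDICT (by name: the statement is the Claim_ definition above) =====
theorem niveau_coherent_spec : Claim_equal_niveau_coherent := by
  intro a ds _
  unfold Spec_niveau_coherent niveau_coherent niveau_coherent_alt
  set l := PySem.List.sorted ds id false with hl
  have hperm : l.Perm ds := PySem.List.sorted_perm ds id false
  have hs : l.Pairwise (· ≤ ·) := by
    have := PySem.List.sorted_pairwise (xs := ds) (key := id) 
    simpa [hl] using this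
  rw [Bool.eq_iff_iff, niveauLoopA_iff, pos_iff_count l hs a, List.all_eq_true]
  constructor
  · intro h d hd
    have := h d (hperm.mem_iff.mpr hd)
    rw [hperm.countP_eq] at this
    simpa using this
  · intro h d hd
    have := h d (hperm.mem_iff.mp hd)
    rw [← hperm.countP_eq] at this
    simpa using this
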